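-- pv_equiv track=rewrite | github.com/weiliddat/aoc2024_py | day02/solve.py | report_safety
-- ===== SOURCE A (Python) =====
-- def report_safety(report: list[int]) -> bool:
--     is_asc = None
--
--     for i in range(1, len(report)):
--         a = report[i - 1]
--         b = report[i]
--
--         if a == b:
--             return False
--         if abs(a - b) > 3:
--             return False
--
--         if is_asc is True and b < a:
--             return False
--         elif is_asc is False and a < b:
--             return False
--         elif is_asc is None:
--             is_asc = b > a
--
--     return True
-- ===== SOURCE B (Python) =====
-- def report_safety(report: list[int]) -> bool:
--     diffs = [b - a for a, b in zip(report, report[1:])]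
--     return all(1 <= d <= 3 for d in diffs) or all(-3 <= d <= -1 for d in diffs)
-- ===== Notes on version B (the rewrite author's own statement) =====
-- stated objective: simpler
-- what changed: Replaces A's stateful early-return pass tracking an is_asc flag by building the consecutive-difference list once and testing two whole-list predicates (all diffs in [1,3] or all in [-3,-1]).
import Mathlib
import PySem

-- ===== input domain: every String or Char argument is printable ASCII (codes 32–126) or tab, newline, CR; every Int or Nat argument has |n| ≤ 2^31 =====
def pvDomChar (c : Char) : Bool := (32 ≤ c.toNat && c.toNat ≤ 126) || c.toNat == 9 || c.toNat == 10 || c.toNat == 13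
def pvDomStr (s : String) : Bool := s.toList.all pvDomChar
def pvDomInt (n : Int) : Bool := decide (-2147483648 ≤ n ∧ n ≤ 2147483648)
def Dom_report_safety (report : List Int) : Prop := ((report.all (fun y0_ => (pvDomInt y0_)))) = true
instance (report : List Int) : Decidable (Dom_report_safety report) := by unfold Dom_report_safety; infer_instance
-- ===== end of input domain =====

-- B builds the consecutive-difference list once and tests two whole-list predicates,
-- replacing A's stateful early-return pass; same O(n) cost, simpler decomposition.
-- ===== PORT A =====
-- the for-loop over i in range(1,len) reading report[i-1], report[i] with state is_asc,
-- transcribed as the obvious structural recursion over adjacent pairs with the same state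
def reportLoopA : List Int → Option Bool → Bool
  | a :: b :: rest, isAsc =>
      if a = b then false
      else if (a - b).natAbs > 3 then false
      else if isAsc = some true ∧ b < a then false
      else if isAsc = some false ∧ a < b then false
      else reportLoopA (b :: rest) (if isAsc = none then some (decide (b > a)) else isAsc)
  | _, _ => true

def report_safety (report : List Int) : Bool := reportLoopA report none

-- ===== PORT B =====
def report_safety_alt (report : List Int) : Bool :=
  let diffs := (report.zip report.tail).map (fun p => p.2 - p.1)
  diffs.all (fun d => decide (1 ≤ d ∧ d ≤ 3)) || diffs.all (fun d => decide (-3 ≤ d ∧ d ≤ -1))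

-- ===== PRECONDITION & SPEC =====
def Spec_report_safety (report : List Int) (out : Bool) : Prop := out = report_safety_alt report
instance (report : List Int) (out : Bool) : Decidable (Spec_report_safety report out) := by unfold Spec_report_safety; infer_instance

-- ===== CLAIM (what is proved, stated in full; the proofs are below) =====
def Claim_equal_report_safety : Prop := ∀ (report : List Int), Dom_report_safety report → Spec_report_safety report (report_safety report)

-- ===== LEMMAS AND PROOFS =====
def allUp (l : List Int) : Bool :=
  ((l.zip l.tail).map (fun p => p.2 - p.1)).all (fun d => decide (1 ≤ d ∧ d ≤ 3))
def allDown (l : List Int) : Bool :=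
  ((l.zip l.tail).map (fun p => p.2 - p.1)).all (fun d => decide (-3 ≤ d ∧ d ≤ -1))

theorem reportLoopA_char : ∀ (l : List Int) (s : Option Bool),
    reportLoopA l s = (match s with
      | none => allUp l || allDown l
      | some true => allUp l
      | some false => allDown l) := by
  intro l
  induction l with
  | nil => intro s; cases s with
    | none => simp [reportLoopA, allUp, allDown]
    | some b => cases b <;> simp [reportLoopA, allUp, allDown]
  | cons a tl ih =>
    intro s
    cases tl with
    | nil => cases s with
      | none => simp [reportLoopA, allUp, allDown]
      | some b => cases b <;> simp [reportLoopA, allUp, allDown]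
    | cons b rest =>
      have hup : allUp (a :: b :: rest) = (decide (1 ≤ b - a ∧ b - a ≤ 3) && allUp (b :: rest)) := by
        simp [allUp]
      have hdn : allDown (a :: b :: rest) = (decide (-3 ≤ b - a ∧ b - a ≤ -1) && allDown (b :: rest)) := by
        simp [allDown]
      cases s with
      | none =>
        simp only [reportLoopA]
        split_ifs with h1 h2 h3 h4
        · simp [hup, hdn]; omega
        · have : (3:Int) < b - a ∨ b - a < -3 := by
            rcases Int.natAbs_eq (a-b) with h | h <;> omega
          simp [hup, hdn]; omega
        · simp at h3
        · simp at h4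
        · rw [ih]
          by_cases hab : a < b
          · have hd : (1:Int) ≤ b - a ∧ b - a ≤ 3 := by
              rcases Int.natAbs_eq (a-b) with h | h <;> omega
            simp [hab, hup, hdn, hd]; omega
          · have hba : b < a := by omega
            have hd : (-3:Int) ≤ b - a ∧ b - a ≤ -1 := by
              rcases Int.natAbs_eq (a-b) with h | h <;> omega
            simp [show ¬ b > a by omega, hup, hdn, hd]; omega
      | some dir =>
        cases dir with
        | true =>
          simp only [reportLoopA]
          split_ifs with h1 h2 h3 h4 h5
          · simp [hup]; omega
          · have : (3:Int) < b - a ∨ b - a < -3 := by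
              rcases Int.natAbs_eq (a-b) with h | h <;> omega
            simp [hup]; omega
          · simp [hup]; omega
          · simp at h4
          · exact h5.elim
          · simp at h3
            rw [ih]
            have hd : (1:Int) ≤ b - a ∧ b - a ≤ 3 := by
              rcases Int.natAbs_eq (a-b) with h | h <;> omega
            simp [hup, hd]
        | false =>
          simp only [reportLoopA]
          split_ifs with h1 h2 h3 h4 h5
          · simp [hdn]; omega
          · have : (3:Int) < b - a ∨ b - a < -3 := by
              rcases Int.natAbs_eq (a-b) with h | h <;> omega
            simp [hdn]; omega
          · simp at h3
          · simp [hdn]; omega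
          · exact h5.elim
          · simp at h4
            rw [ih]
            have hd : (-3:Int) ≤ b - a ∧ b - a ≤ -1 := by
              rcases Int.natAbs_eq (a-b) with h | h <;> omega
            simp [hdn, hd]

-- ===== VERDICT (by name: the statement is the Claim_ definition above) =====
theorem report_safety_spec : Claim_equal_report_safety := by
  intro report _
  unfold Spec_report_safety report_safety report_safety_alt
  rw [reportLoopA_char]
  simp [allUp, allDown]
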